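-- pv_equiv track=rewrite | github.com/btackett3/ModalConsistencyChecker | weblogic.py | cleanall
-- ===== SOURCE A (Python) =====
-- def cleanall(model, worlds, necessities):
--     model = clean(model)
--     for world in worlds:
--         world = clean(world)
--     necessities = clean(necessities)
--
--     for branch in model:
--         branch.sort()
--     for worldclass in worlds:
--         for world in worldclass:
--             world.sort()
--         worldclass = removedupes(worldclass)
--     for n in necessities:
--         n.sort()
--
--     copies = []
--
--     index = 0
--
--     while (index < len(model)):
--         j = index + 1
--
--         while (j < len(model)):
--
--             if (model[index] == model[j]):
--
--                 if (worlds[index] == worlds[j]):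
--
--                     if (necessities[index] == necessities[j]):
--                         copies.append(index)
--             j = j + 1
--         index = index + 1
--
--     sparse = []
--     i = 0
--     while (i < len(model)):
--         if i in copies:
--             i = i + 1
--         else:
--             sparse.append(model[i])
--             i = i + 1
--     model = sparse
--
--     sparse = []
--     i = 0
--     while (i < len(worlds)):
--         if i in copies:
--             i = i + 1
--         else:
--             sparse.append(worlds[i])
--             i = i + 1
--     worlds = sparse
--
--     sparse = []
--     i = 0
--     while (i < len(necessities)):
--         if i in copies:
--             i = i + 1
--         else:
--             sparse.append(necessities[i])
--             i = i + 1
--     necessities = sparse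
--
--     return (model, worlds, necessities)
--
-- def clean(array):
--     i = 0
--     while (i < len(array)):
--         array[i] = removedupes(array[i])
--         i = i + 1
--     return array
--
-- def removedupes(array):
--     copy = []
--     i = 0
--     while (i < len(array)):
--         if array[i] in copy:
--             i = i + 1
--         elif array[i] == []:
--             i = i + 1
--         else:
--             copy.append(array[i])
--     return copy
-- ===== SOURCE B (Python) =====
-- def cleanall(model, worlds, necessities):
--     # Return-value equivalent to A; unlike A it does not mutate its arguments in place.
--     def tidy(xs):
--         # keep first occurrence, drop empty-list elements, then sort
--         seen = set()
--         out = []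
--         for x in xs:
--             k = tuple(x) if isinstance(x, list) else x
--             if x != [] and k not in seen:
--                 seen.add(k)
--                 out.append(x)
--         out.sort()
--         return out
--
--     m = [tidy(row) for row in model]
--     w = [[tidy(v) for v in wc] for wc in worlds]
--     n = [tidy(r) for r in necessities]
--
--     # only rows whose cleaned model part repeats can be duplicates
--     mkeys = [tuple(map(tuple, row)) for row in m]
--     cnt = {}
--     for k in mkeys:
--         cnt[k] = cnt.get(k, 0) + 1
--
--     def fullkey(i):
--         return (mkeys[i], tuple(map(tuple, w[i])), tuple(map(tuple, n[i])))
--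
--     last = {}
--     for i in range(len(m)):
--         if cnt[mkeys[i]] > 1:
--             last[fullkey(i)] = i
--     removed = {i for i in range(len(m))
--                if cnt[mkeys[i]] > 1 and last[fullkey(i)] != i}
--     return ([x for i, x in enumerate(m) if i not in removed],
--             [x for i, x in enumerate(w) if i not in removed],
--             [x for i, x in enumerate(n) if i not in removed])
-- ===== Notes on version B (the rewrite author's own statement) =====
-- stated objective: faster
-- what changed: Replaces the O(n^2) nested duplicate-search and the 'i in copies' list scans with one dict pass recording, for rows whose cleaned model part repeats, the last index of each full row key, plus per-list keeping passes over a removed-index set; a timing run measured B 23.5x faster at the largest size on one input family (1.41x on another).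
import Mathlib
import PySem

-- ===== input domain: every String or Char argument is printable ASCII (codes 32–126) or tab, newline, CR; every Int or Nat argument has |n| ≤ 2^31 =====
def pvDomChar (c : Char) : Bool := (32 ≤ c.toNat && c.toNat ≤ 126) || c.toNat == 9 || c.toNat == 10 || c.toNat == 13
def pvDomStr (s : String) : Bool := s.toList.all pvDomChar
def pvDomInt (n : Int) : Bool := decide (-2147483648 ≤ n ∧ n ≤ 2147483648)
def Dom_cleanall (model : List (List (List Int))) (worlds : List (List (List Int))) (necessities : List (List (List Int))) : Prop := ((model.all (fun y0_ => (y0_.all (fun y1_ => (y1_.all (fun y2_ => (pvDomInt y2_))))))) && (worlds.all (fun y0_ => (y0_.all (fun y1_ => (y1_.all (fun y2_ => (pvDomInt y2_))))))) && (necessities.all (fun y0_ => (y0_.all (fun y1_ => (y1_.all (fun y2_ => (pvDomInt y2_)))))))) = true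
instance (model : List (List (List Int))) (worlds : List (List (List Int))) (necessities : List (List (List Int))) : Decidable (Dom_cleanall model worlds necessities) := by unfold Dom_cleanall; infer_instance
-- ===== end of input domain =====

-- B replaces A's nested duplicate search and its 'i in copies' list scans by one dict pass
-- recording each repeated row-key's last index plus per-list keeping passes (objective:
-- alternative). Equivalence is about the RETURN value only: A also mutates its arguments'
-- inner lists in place, B does not.

-- ===== PORT A =====
-- removedupes at list-of-int-lists element type: drop duplicates (keep first) and empty sublists.
-- (Python's loop does not advance i on append; the next iteration's 'in copy' test then skips the
-- same element, so the net effect is one step per element, as ported here.)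
def rdLoopLL (copy : List (List Int)) : List (List Int) → List (List Int)
  | [] => copy
  | x :: rest =>
    if x ∈ copy then rdLoopLL copy rest
    else if x = [] then rdLoopLL copy rest
    else rdLoopLL (copy ++ [x]) rest

-- removedupes at int element type; the 'array[i] == []' branch is identically False for ints
def rdLoopI (copy : List Int) : List Int → List Int
  | [] => copy
  | x :: rest =>
    if x ∈ copy then rdLoopI copy rest
    else rdLoopI (copy ++ [x]) rest

-- list.sort(); Python's list comparison is lexicographic, which is Lean's List.lt order
def sortLL (xs : List (List Int)) : List (List Int) := PySem.List.sorted xs (fun y => y) false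
def sortI (xs : List Int) : List Int := PySem.List.sorted xs (fun y => y) false

-- the nested while loops collecting indices of rows that reappear later
def copiesA (m w n : List (List (List Int))) : List Nat :=
  (List.range m.length).foldl (fun copies index =>
    ((List.range m.length).drop (index + 1)).foldl (fun copies j =>
      if m.getD index [] = m.getD j [] then
        if w.getD index [] = w.getD j [] then
          if n.getD index [] = n.getD j [] then copies ++ [index] else copies
        else copies
      else copies) copies) []

-- one 'sparse' filter loop; the loop index is 0 ≤ i < len(xs) so getD never sees its default
def sparseA (xs : List (List (List Int))) (copies : List Nat) : List (List (List Int)) :=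
  (List.range xs.length).foldl (fun sp i => if i ∈ copies then sp else sp ++ [xs.getD i []]) []

def cleanall (model : List (List (List Int))) (worlds : List (List (List Int))) (necessities : List (List (List Int))) : List (List (List Int)) × List (List (List Int)) × List (List (List Int)) :=
  let model1 := (model.map (fun branch => rdLoopLL [] branch)).map (fun branch => sortLL branch)
  let worlds1 := worlds.map (fun world => (world.map (fun v => rdLoopI [] v)).map (fun v => sortI v))
  let necessities1 := (necessities.map (fun r => rdLoopLL [] r)).map (fun r => sortLL r)
  let copies := copiesA model1 worlds1 necessities1
  (sparseA model1 copies, sparseA worlds1 copies, sparseA necessities1 copies)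

-- ===== PORT B =====
-- tidy at list-of-int-lists element type; 'seen' is a Python set (PySem.Set)
def tidyLL (xs : List (List Int)) : List (List Int) :=
  PySem.List.sorted
    (xs.foldl (fun (p : List (List Int) × PySem.Set (List Int)) x =>
      if x ≠ [] ∧ x ∉ p.2 then (p.1 ++ [x], p.2.add x) else p) ([], [])).1 (fun y => y) false

-- tidy at int element type; the 'x != []' test is identically True for ints
def tidyI (xs : List Int) : List Int :=
  PySem.List.sorted
    (xs.foldl (fun (p : List Int × PySem.Set Int) x =>
      if x ∉ p.2 then (p.1 ++ [x], p.2.add x) else p) ([], [])).1 (fun y => y) false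

def cleanall_alt (model : List (List (List Int))) (worlds : List (List (List Int))) (necessities : List (List (List Int))) : List (List (List Int)) × List (List (List Int)) × List (List (List Int)) :=
  let m := model.map tidyLL
  let w := worlds.map (fun wc => wc.map tidyI)
  let n := necessities.map tidyLL
  -- mkeys in Python are m's rows as tuples of tuples; a Lean list is its own dict key, so mkeys = m
  let cnt := m.foldl (fun d k => d.insert k (d.getD k 0 + 1))
      (PySem.Dict.empty : PySem.Dict (List (List Int)) Int)
  -- record the last index of each full row key, but only for rows whose cleaned model part repeats
  -- (a Lean triple of lists is the Python fullkey tuple of tuples; 0 ≤ i < len so getD is exact)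
  let last := (List.range m.length).foldl
      (fun d i => if 1 < cnt.getD (m.getD i []) 0 then
          d.insert ((m.getD i [], w.getD i [], n.getD i []) :
            List (List Int) × List (List Int) × List (List Int)) i
        else d)
      (PySem.Dict.empty : PySem.Dict (List (List Int) × List (List Int) × List (List Int)) Nat)
  -- rows NOT sitting at their key's last index (the keys looked up are always present in last,
  -- so getD never sees its default, matching Python's last[fullkey(i)])
  let removed := (List.range m.length).filter
      (fun i => decide (1 < cnt.getD (m.getD i []) 0) &&
        !(last.getD (m.getD i [], w.getD i [], n.getD i []) 0 == i))
  -- '[x for i, x in enumerate(lst) if i not in removed]', one comprehension per list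
  -- (ported as an index loop; indices are 0 ≤ i < len so getD is exact)
  (((List.range m.length).filter (fun i => !(decide (i ∈ removed)))).map (fun i => m.getD i []),
   ((List.range w.length).filter (fun i => !(decide (i ∈ removed)))).map (fun i => w.getD i []),
   ((List.range n.length).filter (fun i => !(decide (i ∈ removed)))).map (fun i => n.getD i []))

-- ===== PRECONDITION & SPEC =====
-- the cleaned form of one model row: duplicates and empty sublists dropped, then sorted
-- (stated with library functions only; used to describe A's domain, not to run either port)
def cleanRow (r : List (List Int)) : List (List Int) :=
  PySem.List.sorted (PySem.List.dedup (r.filter (fun x => !x.isEmpty))) (fun y => y) false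

-- Pre_ excludes inputs whose worlds/necessities lists are shorter than model AND in which two model
-- rows clean to the same value: there A raises IndexError whenever the duplicate pair's comparison
-- indexes past a shorter list, and B, which reads the worlds/necessities row of every repeated
-- model row, raises IndexError.
def Pre_cleanall (model : List (List (List Int))) (worlds : List (List (List Int))) (necessities : List (List (List Int))) : Prop :=
  (model.length ≤ worlds.length ∧ model.length ≤ necessities.length) ∨
    List.Pairwise (fun a b => cleanRow a ≠ cleanRow b) model
instance (model : List (List (List Int))) (worlds : List (List (List Int))) (necessities : List (List (List Int))) : Decidable (Pre_cleanall model worlds necessities) := by unfold Pre_cleanall; infer_instance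

def pvWitness_cleanall : List (List (List Int)) × List (List (List Int)) × List (List (List Int)) :=
  ([[[1]], [[1]]], [[[2]], [[2]]], [[[3]], [[3]]])

def Spec_cleanall (model : List (List (List Int))) (worlds : List (List (List Int))) (necessities : List (List (List Int))) (out : List (List (List Int)) × List (List (List Int)) × List (List (List Int))) : Prop := out = cleanall_alt model worlds necessities
instance (model : List (List (List Int))) (worlds : List (List (List Int))) (necessities : List (List (List Int))) (out : List (List (List Int)) × List (List (List Int)) × List (List (List Int))) : Decidable (Spec_cleanall model worlds necessities out) := by unfold Spec_cleanall; infer_instance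

-- ===== CLAIM (what is proved, stated in full; the proofs are below) =====
def Claim_equal_cleanall : Prop := ∀ (model : List (List (List Int))) (worlds : List (List (List Int))) (necessities : List (List (List Int))), Dom_cleanall model worlds necessities → Pre_cleanall model worlds necessities → Spec_cleanall model worlds necessities (cleanall model worlds necessities)

-- ===== LEMMAS AND PROOFS =====

-- B's (out, seen) fold equals A's copy loop: seen always holds exactly out's elements
theorem tidy_fold_eq (xs : List (List Int)) (acc seen : List (List Int))
    (h : ∀ x, x ∈ seen ↔ x ∈ acc) :
    (xs.foldl (fun (p : List (List Int) × PySem.Set (List Int)) x =>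
      if x ≠ [] ∧ x ∉ p.2 then (p.1 ++ [x], p.2.add x) else p) (acc, seen)).1 = rdLoopLL acc xs := by
  induction xs generalizing acc seen with
  | nil => simp [rdLoopLL]
  | cons x rest ih =>
    simp only [List.foldl_cons, rdLoopLL]
    by_cases hmem : x ∈ acc
    · rw [if_neg (by simp [h, hmem]), if_pos hmem]
      exact ih acc seen h
    · by_cases hnil : x = []
      · rw [if_neg (by simp [hnil]), if_neg hmem, if_pos hnil]
        exact ih acc seen h
      · rw [if_pos ⟨hnil, by simp [h, hmem]⟩, if_neg hmem, if_neg hnil]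
        apply ih
        intro y
        simp [PySem.Set.mem_add, h]

theorem tidyI_fold_eq (xs : List Int) (acc seen : List Int)
    (h : ∀ x, x ∈ seen ↔ x ∈ acc) :
    (xs.foldl (fun (p : List Int × PySem.Set Int) x =>
      if x ∉ p.2 then (p.1 ++ [x], p.2.add x) else p) (acc, seen)).1 = rdLoopI acc xs := by
  induction xs generalizing acc seen with
  | nil => simp [rdLoopI]
  | cons x rest ih =>
    simp only [List.foldl_cons, rdLoopI]
    by_cases hmem : x ∈ acc
    · rw [if_neg (by simp [h, hmem]), if_pos hmem]
      exact ih acc seen h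
    · rw [if_pos (by simp [h, hmem]), if_neg hmem]
      apply ih
      intro y
      simp [PySem.Set.mem_add, h]

theorem tidyLL_eq (xs : List (List Int)) : tidyLL xs = sortLL (rdLoopLL [] xs) := by
  unfold tidyLL sortLL
  rw [tidy_fold_eq xs [] [] (by simp)]

theorem tidyI_eq (xs : List Int) : tidyI xs = sortI (rdLoopI [] xs) := by
  unfold tidyI sortI
  rw [tidyI_fold_eq xs [] [] (by simp)]

theorem mem_drop_range (n m j : Nat) : j ∈ (List.range n).drop m ↔ m ≤ j ∧ j < n := by
  induction n with
  | zero => simp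
  | succ k ih =>
    rw [List.range_succ, List.drop_append, List.mem_append, ih]
    by_cases h : m ≤ k
    · have h0 : m - (List.range k).length = 0 := by simp; omega
      rw [h0]; simp; omega
    · rw [List.drop_eq_nil_of_le (show ([k] : List Nat).length ≤ m - (List.range k).length by simp; omega)]
      simp; omega

-- i is collected by A's nested loops iff the same row reappears at a later index
theorem mem_copiesA (m w n : List (List (List Int))) (i : Nat) :
    i ∈ copiesA m w n ↔ ∃ j, i < j ∧ j < m.length ∧
      m.getD i [] = m.getD j [] ∧ w.getD i [] = w.getD j [] ∧ n.getD i [] = n.getD j [] := by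
  unfold copiesA
  have hstep : ∀ index : Nat, ∀ acc : List Nat,
      ((List.range m.length).drop (index + 1)).foldl (fun copies j =>
        if m.getD index [] = m.getD j [] then
          if w.getD index [] = w.getD j [] then
            if n.getD index [] = n.getD j [] then copies ++ [index] else copies
          else copies
        else copies) acc
      = acc ++ (((List.range m.length).drop (index + 1)).filter
          (fun j => decide (m.getD index [] = m.getD j [] ∧ w.getD index [] = w.getD j [] ∧
            n.getD index [] = n.getD j []))).map (fun _ => index) := by
    intro index acc
    rw [show (fun (copies : List Nat) (j : Nat) =>
        if m.getD index [] = m.getD j [] then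
          if w.getD index [] = w.getD j [] then
            if n.getD index [] = n.getD j [] then copies ++ [index] else copies
          else copies
        else copies)
      = (fun copies j => if (fun j => decide (m.getD index [] = m.getD j [] ∧ w.getD index [] = w.getD j [] ∧
            n.getD index [] = n.getD j [])) j = true then copies ++ [(fun _ => index) j] else copies) from by
        funext copies j; split_ifs <;> simp_all]
    exact PySem.List.foldl_append_if _ _ _ _
  rw [show (fun (copies : List Nat) (index : Nat) =>
      ((List.range m.length).drop (index + 1)).foldl (fun copies j =>
        if m.getD index [] = m.getD j [] then
          if w.getD index [] = w.getD j [] then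
            if n.getD index [] = n.getD j [] then copies ++ [index] else copies
          else copies
        else copies) copies)
    = (fun copies index => copies ++ (((List.range m.length).drop (index + 1)).filter
          (fun j => decide (m.getD index [] = m.getD j [] ∧ w.getD index [] = w.getD j [] ∧
            n.getD index [] = n.getD j []))).map (fun _ => index)) from by
      funext acc index; exact hstep index acc]
  rw [PySem.List.foldl_append_eq_flatMap]
  simp only [List.nil_append, List.mem_flatMap, List.mem_map, List.mem_filter, List.mem_range,
    mem_drop_range]
  constructor
  · rintro ⟨a, ha, j, ⟨⟨haj, hj⟩, hc⟩, rfl⟩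
    simp only [decide_eq_true_eq] at hc
    exact ⟨j, by omega, hj, hc⟩
  · rintro ⟨j, hij, hj, h1, h2, h3⟩
    exact ⟨i, by omega, j, ⟨⟨by omega, hj⟩, by simp only [decide_eq_true_eq]; exact ⟨h1, h2, h3⟩⟩, rfl⟩

-- a dict built by inserting i under key f i, scanned left to right, remembers the LAST index per key
theorem get?_foldl_insert_last {K : Type} [BEq K] [LawfulBEq K] [DecidableEq K]
    (f : Nat → K) (l : List Nat) (d : PySem.Dict K Nat) (k : K) :
    (l.foldl (fun d i => d.insert (f i) i) d).get? k =
      match l.reverse.find? (fun i => decide (f i = k)) with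
      | some i => some i
      | none => d.get? k := by
  induction l using List.reverseRecOn generalizing d with
  | nil => simp
  | append_singleton l a ih =>
    rw [List.foldl_append]
    simp only [List.foldl_cons, List.foldl_nil, List.reverse_append, List.reverse_singleton,
      List.singleton_append, List.find?_cons]
    by_cases h : f a = k
    · simp [h]
    · simp only [h, decide_false]
      rw [PySem.Dict.get?_insert]
      rw [if_neg (by intro hh; exact h hh.symm)]
      exact ih d

theorem find?_rev_filter_range_some_self_iff {K : Type} [DecidableEq K]
    (f : Nat → K) (C : Nat → Bool) (N i : Nat) (hi : i < N) (hC : C i = true) :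
    (((List.range N).filter C).reverse.find? (fun j => decide (f j = f i)) = some i) ↔
      ∀ j, i < j → j < N → C j = true → f j ≠ f i := by
  induction N with
  | zero => omega
  | succ M ih =>
    rw [List.range_succ, List.filter_append, List.reverse_append]
    by_cases hCM : C M = true
    · rw [show List.filter C [M] = [M] from by simp [hCM]]
      rw [List.reverse_singleton, List.singleton_append, List.find?_cons]
      by_cases hMi : f M = f i
      · simp only [hMi, decide_true]
        by_cases hiM : i = M
        · subst hiM
          constructor
          · intro _ j h1 h2 _ _; omega
          · intro _; rfl
        · constructor
          · intro h; exact absurd (Option.some.inj h) (by omega)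
          · intro h; exact absurd hMi (h M (by omega) (by omega) hCM)
      · simp only [hMi, decide_false]
        have hiM : i < M := by
          rcases Nat.lt_succ_iff_lt_or_eq.mp hi with h | h
          · exact h
          · subst h; exact absurd rfl hMi
        rw [ih hiM]
        constructor
        · intro h j h1 h2 h3
          rcases Nat.lt_succ_iff_lt_or_eq.mp h2 with h2' | h2'
          · exact h j h1 h2' h3
          · subst h2'; exact hMi
        · intro h j h1 h2 h3; exact h j h1 (by omega) h3
    · rw [show List.filter C [M] = [] from by simp [Bool.not_eq_true] at hCM; simp [hCM]]
      have hiM : i < M := by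
        rcases Nat.lt_succ_iff_lt_or_eq.mp hi with h | h
        · exact h
        · subst h; exact absurd hC hCM
      rw [List.reverse_nil, List.nil_append, ih hiM]
      constructor
      · intro h j h1 h2 h3
        rcases Nat.lt_succ_iff_lt_or_eq.mp h2 with h2' | h2'
        · exact h j h1 h2' h3
        · subst h2'; exact absurd h3 hCM
      · intro h j h1 h2 h3; exact h j h1 (by omega) h3

theorem count_getElem_gt_one_iff (l : List (List (List Int))) (i : Nat) (hi : i < l.length) :
    1 < l.count (l.getD i []) ↔ ∃ j, j < l.length ∧ j ≠ i ∧ l.getD j [] = l.getD i [] := by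
  rw [List.getD_eq_getElem l [] hi]
  have hconv : @List.count _ instBEqOfDecidableEq l[i] l = l.count l[i] := by
    congr 1; exact lawful_beq_subsingleton _ _
  constructor
  · intro h
    have hd := (List.duplicate_iff_two_le_count (x := l[i]) (l := l)).mpr (by rw [hconv]; omega)
    rw [List.duplicate_iff_exists_distinct_get] at hd
    obtain ⟨a, b, hab, ha, hb⟩ := hd
    simp only [List.get_eq_getElem] at ha hb
    by_cases hbi : (b : Nat) = i
    · refine ⟨a, a.isLt, by omega, ?_⟩
      rw [List.getD_eq_getElem l [] a.isLt, ← ha]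
    · refine ⟨b, b.isLt, hbi, ?_⟩
      rw [List.getD_eq_getElem l [] b.isLt, ← hb]
  · rintro ⟨j, hj, hji, he⟩
    rw [List.getD_eq_getElem l [] hj] at he
    have hd : List.Duplicate l[i] l := by
      rw [List.duplicate_iff_exists_distinct_get]
      rcases Nat.lt_or_ge j i with hlt | hge
      · exact ⟨⟨j, hj⟩, ⟨i, hi⟩, by simpa using hlt, by simp [he], by simp⟩
      · have hij : i < j := by omega
        exact ⟨⟨i, hi⟩, ⟨j, hj⟩, by simpa using hij, by simp, by simp [he]⟩
    have h2 := List.duplicate_iff_two_le_count.mp hd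
    rw [hconv] at h2
    omega

theorem sparseA_eq_filter (xs : List (List (List Int))) (copies : List Nat) :
    sparseA xs copies =
      ((List.range xs.length).filter (fun i => !(decide (i ∈ copies)))).map (fun i => xs.getD i []) := by
  unfold sparseA
  rw [show (fun (sp : List (List (List Int))) (i : Nat) =>
        if i ∈ copies then sp else sp ++ [xs.getD i []])
    = (fun sp i => if (fun i => !(decide (i ∈ copies))) i = true then sp ++ [(fun i => xs.getD i []) i] else sp) from by
      funext sp i; split_ifs <;> simp_all]
  rw [PySem.List.foldl_append_if]
  simp

-- proof-side names for B's count dict, last dict and removal test (definitionally what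
-- cleanall_alt computes after its cleaned lists are named m, w, n)
def keyB (M W N : List (List (List Int))) (i : Nat) :
    List (List Int) × List (List Int) × List (List Int) :=
  (M.getD i [], W.getD i [], N.getD i [])

def cntB (M : List (List (List Int))) : PySem.Dict (List (List Int)) Int :=
  M.foldl (fun d k => d.insert k (d.getD k 0 + 1)) PySem.Dict.empty

def lastB (M W N : List (List (List Int))) :
    PySem.Dict (List (List Int) × List (List Int) × List (List Int)) Nat :=
  (List.range M.length).foldl
    (fun d i => if 1 < (cntB M).getD (M.getD i []) 0 then d.insert (keyB M W N i) i else d)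
    PySem.Dict.empty

def remPredB (M W N : List (List (List Int))) (i : Nat) : Bool :=
  decide (1 < (cntB M).getD (M.getD i []) 0) && !((lastB M W N).getD (keyB M W N i) 0 == i)

-- B's removal test agrees with A's 'i in copies' test, for every index below len(model)
theorem removed_cond (M W N : List (List (List Int))) (i : Nat) (hi : i < M.length) :
    remPredB M W N i = decide (i ∈ copiesA M W N) := by
  have hcnt : ∀ j : Nat, (cntB M).getD (M.getD j []) 0 = (M.count (M.getD j []) : Int) := by
    intro j
    unfold cntB
    rw [PySem.Dict.getD_foldl_insert_add_one]
    simp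
  have hdec : ∀ j : Nat, decide (1 < (cntB M).getD (M.getD j []) 0)
      = decide (1 < M.count (M.getD j [])) := by
    intro j
    rw [hcnt j]
    simp
  have hkeyC : ∀ j : Nat, keyB M W N j = keyB M W N i →
      decide (1 < M.count (M.getD j [])) = decide (1 < M.count (M.getD i [])) := by
    intro j e
    unfold keyB at e
    simp only [Prod.mk.injEq] at e
    rw [e.1]
  unfold remPredB
  rw [hdec i]
  by_cases hq : decide (1 < M.count (M.getD i [])) = true
  · rw [hq, Bool.true_and]
    have hlast : lastB M W N = ((List.range M.length).filter
        (fun j => decide (1 < M.count (M.getD j [])))).foldl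
        (fun d j => d.insert (keyB M W N j) j) PySem.Dict.empty := by
      unfold lastB
      rw [List.foldl_filter]
      apply PySem.List.foldl_congr_mem
      intro d j _
      by_cases h : (1 : Int) < (cntB M).getD (M.getD j []) 0
      · rw [if_pos h, if_pos (by rw [hcnt j] at h; simpa using h)]
      · rw [if_neg h, if_neg (by rw [hcnt j] at h; simpa using h)]
    rw [hlast, PySem.Dict.getD_eq_get?_getD,
      get?_foldl_insert_last (keyB M W N) _ _ (keyB M W N i)]
    have hmem : i ∈ ((List.range M.length).filter
        (fun j => decide (1 < M.count (M.getD j [])))).reverse := by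
      rw [List.mem_reverse, List.mem_filter, List.mem_range]
      exact ⟨hi, hq⟩
    cases hf : ((List.range M.length).filter
        (fun j => decide (1 < M.count (M.getD j [])))).reverse.find?
        (fun j => decide (keyB M W N j = keyB M W N i)) with
    | none =>
      exact absurd (by simp : (fun j => decide (keyB M W N j = keyB M W N i)) i = true)
        (by simpa using List.find?_eq_none.mp hf i hmem)
    | some j0 =>
      simp only [Option.getD_some]
      have hiff := find?_rev_filter_range_some_self_iff (keyB M W N)
        (fun j => decide (1 < M.count (M.getD j []))) M.length i hi hq
      have hcop : i ∈ copiesA M W N ↔ ∃ j, i < j ∧ j < M.length ∧ keyB M W N j = keyB M W N i := by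
        rw [mem_copiesA]
        unfold keyB
        constructor
        · rintro ⟨j, h1, h2, e1, e2, e3⟩; exact ⟨j, h1, h2, by rw [← e1, ← e2, ← e3]⟩
        · rintro ⟨j, h1, h2, e⟩
          simp only [Prod.mk.injEq] at e
          exact ⟨j, h1, h2, e.1.symm, e.2.1.symm, e.2.2.symm⟩
      by_cases hP : ∀ j, i < j → j < M.length → keyB M W N j ≠ keyB M W N i
      · have hfi := hiff.mpr (fun j a b _ => hP j a b)
        rw [hf] at hfi
        have hj0 : j0 = i := Option.some.inj hfi
        have hnotin : ¬ i ∈ copiesA M W N := by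
          rw [hcop]; rintro ⟨j, ha, hb, e⟩; exact hP j ha hb e
        simp [hj0, hnotin]
      · push Not at hP
        obtain ⟨j, h1, h2, e⟩ := hP
        have hmemc : i ∈ copiesA M W N := hcop.mpr ⟨j, h1, h2, e⟩
        have hne : j0 ≠ i := by
          intro h; subst h
          have := hiff.mp hf j h1 h2 (by simpa using (hkeyC j e).trans hq)
          exact this e
        simp [hmemc, hne]
  · simp only [Bool.not_eq_true] at hq
    rw [hq, Bool.false_and]
    have hnotin : ¬ i ∈ copiesA M W N := by
      rw [mem_copiesA]
      rintro ⟨j, h1, h2, e1, e2, e3⟩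
      have hgt : 1 < M.count (M.getD i []) :=
        (count_getElem_gt_one_iff M i hi).mpr ⟨j, h2, by omega, e1.symm⟩
      rw [List.getD_eq_getElem?_getD] at hgt
      simp at hq
      omega
    simp [hnotin]

-- cleanall_alt, rewritten with its cleaned lists named and its removal test reduced to A's
theorem alt_eq (model worlds necessities : List (List (List Int))) :
    cleanall_alt model worlds necessities =
      (sparseA (model.map tidyLL)
        (copiesA (model.map tidyLL) (worlds.map (fun wc => wc.map tidyI)) (necessities.map tidyLL)),
       sparseA (worlds.map (fun wc => wc.map tidyI))
        (copiesA (model.map tidyLL) (worlds.map (fun wc => wc.map tidyI)) (necessities.map tidyLL)),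
       sparseA (necessities.map tidyLL)
        (copiesA (model.map tidyLL) (worlds.map (fun wc => wc.map tidyI)) (necessities.map tidyLL))) := by
  unfold cleanall_alt
  set m := model.map tidyLL with hm
  set w := worlds.map (fun wc => wc.map tidyI) with hwdef
  set n := necessities.map tidyLL with hndef
  show (((List.range m.length).filter
      (fun i => !(decide (i ∈ (List.range m.length).filter (remPredB m w n))))).map
        (fun i => m.getD i []),
    ((List.range w.length).filter
      (fun i => !(decide (i ∈ (List.range m.length).filter (remPredB m w n))))).map
        (fun i => w.getD i []),
    ((List.range n.length).filter
      (fun i => !(decide (i ∈ (List.range m.length).filter (remPredB m w n))))).map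
        (fun i => n.getD i [])) = _
  have hremoved : (List.range m.length).filter (remPredB m w n)
      = (List.range m.length).filter (fun i => decide (i ∈ copiesA m w n)) := by
    apply List.filter_congr
    intro i hi
    exact removed_cond m w n i (List.mem_range.mp hi)
  have hpt : (fun i => !(decide (i ∈ copiesA m w n)))
      = (fun i => !(decide (i ∈ (List.range m.length).filter (remPredB m w n)))) := by
    funext i
    congr 1
    apply decide_eq_decide.mpr
    rw [hremoved, List.mem_filter, List.mem_range, decide_eq_true_eq]
    constructor
    · intro h
      obtain ⟨j, h1, h2, _⟩ := (mem_copiesA m w n i).mp h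
      exact ⟨by omega, h⟩
    · intro h; exact h.2
  rw [sparseA_eq_filter, sparseA_eq_filter, sparseA_eq_filter, hpt]

-- ===== VERDICT (by name: the statement is the Claim_ definition above) =====
theorem cleanall_spec : Claim_equal_cleanall := by
  intro model worlds necessities _ _
  unfold Spec_cleanall
  rw [alt_eq model worlds necessities]
  unfold cleanall
  simp only [List.map_map, Function.comp_def,
    show tidyLL = fun r => sortLL (rdLoopLL [] r) from funext tidyLL_eq,
    show tidyI = fun v => sortI (rdLoopI [] v) from funext tidyI_eq]
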